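-- pv_equiv track=rewrite | github.com/Imadait01/MobileSec | MobileSec-main/backend/SecretHunter/api.py | calculate_severity_summary
-- ===== SOURCE A (Python) =====
-- def calculate_severity_summary(secrets: list) -> dict:
--     """Calculate severity distribution of found secrets"""
--     summary = {"critical": 0, "high": 0, "medium": 0, "low": 0, "info": 0}
--
--     for secret in secrets:
--         severity = secret.get("severity", "low").lower()
--         if severity in summary:
--             summary[severity] += 1
--         else:
--             summary["info"] += 1
--
--     return summary
-- ===== SOURCE B (Python) =====
-- def calculate_severity_summary(secrets: list) -> dict:
--     """Calculate severity distribution of found secrets"""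
--     # pass 1: tabulate a frequency table of (lowercased) severities
--     counts = {}
--     for secret in secrets:
--         sev = secret.get("severity", "low").lower()
--         counts[sev] = counts.get(sev, 0) + 1
--     # pass 2: read off the five fixed buckets, then fold every unknown severity's count into "info"
--     summary = {k: counts.get(k, 0) for k in ("critical", "high", "medium", "low", "info")}
--     summary["info"] += sum(n for s, n in counts.items() if s not in summary)
--     return summary
-- ===== Notes on version B (the rewrite author's own statement) =====
-- stated objective: alternative
-- what changed: Replaced A's single fused increment loop over the fixed five-key summary with a two-phase decomposition: a first pass builds a frequency table of lowercased severities, then a second pass over the distinct (severity, count) pairs buckets each count into the known key or into 'info'.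
import Mathlib
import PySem

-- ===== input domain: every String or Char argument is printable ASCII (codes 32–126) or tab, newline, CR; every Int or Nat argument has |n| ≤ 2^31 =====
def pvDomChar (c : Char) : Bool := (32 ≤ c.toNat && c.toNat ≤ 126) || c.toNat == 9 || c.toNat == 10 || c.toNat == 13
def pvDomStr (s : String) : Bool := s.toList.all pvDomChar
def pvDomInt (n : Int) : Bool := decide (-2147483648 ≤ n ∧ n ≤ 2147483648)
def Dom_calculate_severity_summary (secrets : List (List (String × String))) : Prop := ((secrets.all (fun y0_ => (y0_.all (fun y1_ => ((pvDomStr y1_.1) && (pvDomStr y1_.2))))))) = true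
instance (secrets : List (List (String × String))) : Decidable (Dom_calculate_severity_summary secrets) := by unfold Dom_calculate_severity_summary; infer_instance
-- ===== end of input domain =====

-- B decomposes A's fused increment loop into two passes (frequency table, then bucketing); alternative, same O(n) cost.

-- ===== PORT A =====
-- severity = secret.get("severity", "low").lower()
def pvSev (secret : List (String × String)) : String :=
  PySem.Str.lower (PySem.Dict.getD (PySem.Dict.mk secret) "severity" "low")

-- loop body: if severity in summary: summary[severity] += 1 else: summary["info"] += 1
def pvStepA (summary : PySem.Dict String Int) (severity : String) : PySem.Dict String Int :=
  if summary.contains severity then summary.modify severity 0 (· + 1)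
  else summary.modify "info" 0 (· + 1)

def calculate_severity_summary (secrets : List (List (String × String))) : List (String × Int) :=
  let summary : PySem.Dict String Int :=
    PySem.Dict.mk [("critical", 0), ("high", 0), ("medium", 0), ("low", 0), ("info", 0)]
  let summary := secrets.foldl (fun summary secret => pvStepA summary (pvSev secret)) summary
  summary.items

-- ===== PORT B =====
def calculate_severity_summary_alt (secrets : List (List (String × String))) : List (String × Int) :=
  -- pass 1: counts[sev] = counts.get(sev, 0) + 1
  let counts : PySem.Dict String Int := secrets.foldl (fun counts secret =>
    let sev := pvSev secret
    counts.insert sev (counts.getD sev 0 + 1)) PySem.Dict.empty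
  -- pass 2: summary = {k: counts.get(k, 0) for k in (...)}
  let summary : PySem.Dict String Int :=
    (["critical", "high", "medium", "low", "info"]).foldl
      (fun d k => d.insert k (counts.getD k 0)) PySem.Dict.empty
  -- summary["info"] += sum(n for s, n in counts.items() if s not in summary)
  let extra : Int := counts.items.foldl
    (fun acc p => if !(summary.contains p.1) then acc + p.2 else acc) 0
  let summary := summary.modify "info" 0 (· + extra)
  summary.items

-- ===== PRECONDITION & SPEC =====
def Spec_calculate_severity_summary (secrets : List (List (String × String))) (out : List (String × Int)) : Prop := out = calculate_severity_summary_alt secrets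
instance (secrets : List (List (String × String))) (out : List (String × Int)) : Decidable (Spec_calculate_severity_summary secrets out) := by unfold Spec_calculate_severity_summary; infer_instance

-- ===== CLAIM (what is proved, stated in full; the proofs are below) =====
def Claim_equal_calculate_severity_summary : Prop := ∀ (secrets : List (List (String × String))), Dom_calculate_severity_summary secrets → Spec_calculate_severity_summary secrets (calculate_severity_summary secrets)

-- ===== LEMMAS AND PROOFS =====

-- the severities that fall into no fixed bucket
def pvUnknown (s : String) : Bool :=
  !(s == "critical" || s == "high" || s == "medium" || s == "low" || s == "info")

-- A's loop, characterised over the list of severities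
lemma lemA (l : List String) (v1 v2 v3 v4 v5 : Int) :
    l.foldl pvStepA
      (PySem.Dict.mk [("critical", v1), ("high", v2), ("medium", v3), ("low", v4), ("info", v5)])
    = PySem.Dict.mk [("critical", v1 + l.count "critical"), ("high", v2 + l.count "high"),
        ("medium", v3 + l.count "medium"), ("low", v4 + l.count "low"),
        ("info", v5 + l.count "info" + l.countP pvUnknown)] := by
  induction l generalizing v1 v2 v3 v4 v5 with
  | nil => simp
  | cons s l ih =>
    set D := PySem.Dict.mk [("critical", v1), ("high", v2), ("medium", v3), ("low", v4), ("info", v5)] with hD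
    by_cases h1 : s = "critical"
    · have hstep : pvStepA D s
          = PySem.Dict.mk [("critical", v1 + 1), ("high", v2), ("medium", v3), ("low", v4), ("info", v5)] := by
        subst h1
        simp [hD, pvStepA, PySem.Dict.contains, PySem.Dict.modify, PySem.Dict.insert, PySem.Dict.getD, PySem.Dict.get?]
      rw [List.foldl_cons, hstep, ih]
      subst h1
      simp [pvUnknown]
      omega
    · by_cases h2 : s = "high"
      · have hstep : pvStepA D s
            = PySem.Dict.mk [("critical", v1), ("high", v2 + 1), ("medium", v3), ("low", v4), ("info", v5)] := by
          subst h2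
          simp [hD, pvStepA, PySem.Dict.contains, PySem.Dict.modify, PySem.Dict.insert, PySem.Dict.getD, PySem.Dict.get?]
        rw [List.foldl_cons, hstep, ih]
        subst h2
        simp [pvUnknown]
        omega
      · by_cases h3 : s = "medium"
        · have hstep : pvStepA D s
              = PySem.Dict.mk [("critical", v1), ("high", v2), ("medium", v3 + 1), ("low", v4), ("info", v5)] := by
            subst h3
            simp [hD, pvStepA, PySem.Dict.contains, PySem.Dict.modify, PySem.Dict.insert, PySem.Dict.getD, PySem.Dict.get?]
          rw [List.foldl_cons, hstep, ih]
          subst h3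
          simp [pvUnknown]
          omega
        · by_cases h4 : s = "low"
          · have hstep : pvStepA D s
                = PySem.Dict.mk [("critical", v1), ("high", v2), ("medium", v3), ("low", v4 + 1), ("info", v5)] := by
              subst h4
              simp [hD, pvStepA, PySem.Dict.contains, PySem.Dict.modify, PySem.Dict.insert, PySem.Dict.getD, PySem.Dict.get?]
            rw [List.foldl_cons, hstep, ih]
            subst h4
            simp [pvUnknown]
            omega
          · by_cases h5 : s = "info"
            · have hstep : pvStepA D s
                  = PySem.Dict.mk [("critical", v1), ("high", v2), ("medium", v3), ("low", v4), ("info", v5 + 1)] := by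
                subst h5
                simp [hD, pvStepA, PySem.Dict.contains, PySem.Dict.modify, PySem.Dict.insert, PySem.Dict.getD, PySem.Dict.get?]
              rw [List.foldl_cons, hstep, ih]
              subst h5
              simp [pvUnknown]
              omega
            · have hstep : pvStepA D s
                  = PySem.Dict.mk [("critical", v1), ("high", v2), ("medium", v3), ("low", v4), ("info", v5 + 1)] := by
                simp [hD, pvStepA, PySem.Dict.contains, PySem.Dict.modify, PySem.Dict.insert, PySem.Dict.getD, PySem.Dict.get?,
                  Ne.symm h1, Ne.symm h2, Ne.symm h3, Ne.symm h4, Ne.symm h5]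
              rw [List.foldl_cons, hstep, ih]
              have hu : pvUnknown s = true := by
                simp [pvUnknown, h1, h2, h3, h4, h5]
              simp [List.count_cons, List.countP_cons, hu, beq_iff_eq,
                Ne.symm h1, Ne.symm h2, Ne.symm h3, Ne.symm h4, Ne.symm h5]
              refine ⟨h1, h2, h3, h4, ?_⟩
              simp [h5]
              omega

-- splitting a countP along a second predicate
lemma countP_split (l : List String) (p q : String → Bool) :
    l.countP p = l.countP (fun a => p a && q a) + l.countP (fun a => p a && !q a) := by
  induction l with
  | nil => simp
  | cons x l ih =>
    by_cases hp : p x <;> by_cases hq : q x <;>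
      simp [List.countP_cons, hp, hq, ih] <;> omega

-- grouping: summing the multiplicities of the distinct P-elements recounts the P-elements
lemma sum_count_filter (P : String → Bool) (u sevs : List String) (hn : u.Nodup)
    (hm : ∀ x, x ∈ u ↔ x ∈ sevs) :
    (((u.filter P).map (fun k => (sevs.count k : Int))).sum) = (sevs.countP P : Int) := by
  induction u generalizing sevs with
  | nil =>
    have : sevs.countP P = 0 := by
      apply List.countP_eq_zero.mpr
      intro a ha
      exact absurd ((hm a).mpr ha) (List.not_mem_nil)
    simp [this]
  | cons k u ih =>
    have hk : k ∉ u := (List.nodup_cons.mp hn).1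
    have hn' : u.Nodup := (List.nodup_cons.mp hn).2
    have hm' : ∀ x, x ∈ u ↔ x ∈ sevs.filter (fun a => !(a == k)) := by
      intro x
      constructor
      · intro hx
        have hxk : x ≠ k := fun e => hk (e ▸ hx)
        exact List.mem_filter.mpr ⟨(hm x).mp (List.mem_cons_of_mem _ hx), by simp [hxk]⟩
      · intro hx
        rcases List.mem_filter.mp hx with ⟨hxs, hxk⟩
        have hxk' : x ≠ k := by simpa using hxk
        rcases List.mem_cons.mp ((hm x).mpr hxs) with h | h
        · exact absurd h hxk'
        · exact h
    have ihh := ih (sevs.filter (fun a => !(a == k))) hn' hm'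
    have hmapeq : (u.filter P).map (fun j => ((sevs.filter (fun a => !(a == k))).count j : Int))
        = (u.filter P).map (fun j => (sevs.count j : Int)) := by
      apply List.map_congr_left
      intro j hj
      have hju : j ∈ u := List.mem_of_mem_filter hj
      have hjk : j ≠ k := fun e => hk (e ▸ hju)
      congr 1
      rw [List.count_filter]
      simp [hjk]
    have hsplit := countP_split sevs P (fun a => a == k)
    have hck : sevs.countP (fun a => P a && (a == k)) = if P k then sevs.count k else 0 := by
      by_cases hPk : P k
      · rw [if_pos hPk, List.count_eq_countP]
        apply List.countP_congr
        intro a _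
        constructor
        · intro h; simpa using (Bool.and_elim_right h)
        · intro h
          have : a = k := by simpa using h
          subst this
          simp [hPk]
      · rw [if_neg hPk]
        apply List.countP_eq_zero.mpr
        intro a _
        by_cases h : a = k
        · subst h; simp [hPk]
        · simp [h]
    have hfil : sevs.countP (fun a => P a && !(a == k)) = (sevs.filter (fun a => !(a == k))).countP P := by
      rw [List.countP_filter]
    by_cases hPk : P k
    · rw [List.filter_cons_of_pos hPk, List.map_cons, List.sum_cons, ← hmapeq, ihh]
      rw [hsplit, hck, hfil, if_pos hPk]
      push_cast
      ring
    · rw [List.filter_cons_of_neg (by simp [hPk]), ← hmapeq, ihh]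
      rw [hsplit, hck, hfil, if_neg hPk]
      simp

-- the five-key summary contains s exactly when s is not unknown
lemma contains_five (s : String) (a1 a2 a3 a4 a5 : Int) :
    (PySem.Dict.mk [("critical", a1), ("high", a2), ("medium", a3), ("low", a4), ("info", a5)]).contains s
      = !(pvUnknown s) := by
  by_cases h1 : s = "critical"
  · subst h1; simp [PySem.Dict.contains, pvUnknown]
  · by_cases h2 : s = "high"
    · subst h2; simp [PySem.Dict.contains, pvUnknown]
    · by_cases h3 : s = "medium"
      · subst h3; simp [PySem.Dict.contains, pvUnknown]
      · by_cases h4 : s = "low"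
        · subst h4; simp [PySem.Dict.contains, pvUnknown]
        · by_cases h5 : s = "info"
          · subst h5; simp [PySem.Dict.contains, pvUnknown]
          · have e1 : ("critical" == s) = false := by simp [Ne.symm h1]
            have e2 : ("high" == s) = false := by simp [Ne.symm h2]
            have e3 : ("medium" == s) = false := by simp [Ne.symm h3]
            have e4 : ("low" == s) = false := by simp [Ne.symm h4]
            have e5 : ("info" == s) = false := by simp [Ne.symm h5]
            have f1 : (s == "critical") = false := by simp [h1]
            have f2 : (s == "high") = false := by simp [h2]
            have f3 : (s == "medium") = false := by simp [h3]
            have f4 : (s == "low") = false := by simp [h4]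
            have f5 : (s == "info") = false := by simp [h5]
            simp [PySem.Dict.contains, pvUnknown, e1, e2, e3, e4, e5, f1, f2, f3, f4, f5]

-- ===== VERDICT (by name: the statement is the Claim_ definition above) =====
theorem calculate_severity_summary_spec : Claim_equal_calculate_severity_summary := by
  intro secrets _
  unfold Spec_calculate_severity_summary calculate_severity_summary calculate_severity_summary_alt
  simp only []
  -- both loops over the severities list
  rw [show (fun (summary : PySem.Dict String Int) secret => pvStepA summary (pvSev secret))
        = (fun summary secret => pvStepA summary (pvSev secret)) from rfl]
  rw [← List.foldl_map (f := pvSev) (g := pvStepA)]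
  rw [← List.foldl_map (f := pvSev) (g := fun (c : PySem.Dict String Int) x => c.insert x (c.getD x 0 + 1))]
  set sevs := secrets.map pvSev with hsevs
  rw [lemA]
  rw [PySem.Dict.foldl_insert_getD_add_one_eq_counter]
  set C := PySem.Dict.counter sevs with hC
  -- the dict comprehension over the five keys
  have hsum0 : (["critical", "high", "medium", "low", "info"]).foldl
        (fun (d : PySem.Dict String Int) k => d.insert k (C.getD k 0)) PySem.Dict.empty
      = PySem.Dict.mk [("critical", C.getD "critical" 0), ("high", C.getD "high" 0),
          ("medium", C.getD "medium" 0), ("low", C.getD "low" 0), ("info", C.getD "info" 0)] := by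
    simp [List.foldl, PySem.Dict.insert, PySem.Dict.empty, PySem.Dict.contains]
  rw [hsum0]
  -- the residual sum over the counter's items
  have hextra : C.items.foldl
        (fun acc p => if !((PySem.Dict.mk [("critical", C.getD "critical" 0), ("high", C.getD "high" 0),
          ("medium", C.getD "medium" 0), ("low", C.getD "low" 0), ("info", C.getD "info" 0)]).contains p.1)
          then acc + p.2 else acc) 0
      = (sevs.countP pvUnknown : Int) := by
    rw [PySem.List.foldl_congr_mem
      (g := fun (acc : Int) (p : String × Int) => if pvUnknown p.1 then acc + p.2 else acc)
      (h := by intro acc p _; rw [contains_five]; simp)]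
    rw [PySem.List.foldl_if_eq_foldl_filter]
    rw [PySem.List.foldl_add (g := fun (p : String × Int) => p.2)]
    rw [hC, PySem.Dict.items_counter]
    rw [List.filter_map, List.map_map]
    simp only [Function.comp_def]
    rw [sum_count_filter pvUnknown (PySem.Set.ofList sevs) sevs (PySem.Set.nodup_ofList sevs)
      (fun x => PySem.Set.mem_ofList sevs x)]
    simp
  rw [hextra]
  -- final modify of "info"
  have hmod : (PySem.Dict.mk [("critical", C.getD "critical" 0), ("high", C.getD "high" 0),
          ("medium", C.getD "medium" 0), ("low", C.getD "low" 0), ("info", C.getD "info" 0)]).modify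
        "info" 0 (· + (sevs.countP pvUnknown : Int))
      = PySem.Dict.mk [("critical", C.getD "critical" 0), ("high", C.getD "high" 0),
          ("medium", C.getD "medium" 0), ("low", C.getD "low" 0),
          ("info", C.getD "info" 0 + (sevs.countP pvUnknown : Int))] := by
    simp [PySem.Dict.modify, PySem.Dict.insert, PySem.Dict.contains, PySem.Dict.getD, PySem.Dict.get?]
  rw [hmod]
  simp [hC, PySem.Dict.getD_counter]
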